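-- pv_equiv track=rewrite | github.com/MeowKJ/maimai-bot | src/utils/color_utils.py | get_img_code_from_dx_rating
-- ===== SOURCE A (Python) =====
-- def get_img_code_from_dx_rating(dx_rating):
--     """
--     根据 DX 评级获取图片代码。
--
--     Args:
--         dx_rating (int): DX 评级。
--
--     Returns:
--         str: 图片代码。
--     """
--     ranges = [
--         (0, 999, "01"),
--         (1000, 1999, "02"),
--         (2000, 3999, "03"),
--         (4000, 6999, "04"),
--         (7000, 9999, "05"),
--         (10000, 11999, "06"),
--         (12000, 12999, "07"),
--         (13000, 13999, "08"),
--         (14000, 14499, "09"),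
--         (14500, 14999, "09"),
--     ]
--
--     for lower, upper, code in ranges:
--         if lower <= dx_rating <= upper:
--             return code
--
--     return "10"
-- ===== SOURCE B (Python) =====
-- _UPPERS = [999, 1999, 3999, 6999, 9999, 11999, 12999, 13999, 14499, 14999]
-- _CODES = ["01", "02", "03", "04", "05", "06", "07", "08", "09", "09"]
--
--
-- def get_img_code_from_dx_rating(dx_rating):
--     if dx_rating < 0 or dx_rating > 14999:
--         return "10"
--     lo, hi = 0, len(_UPPERS)
--     while lo < hi:
--         mid = (lo + hi) // 2
--         if _UPPERS[mid] < dx_rating: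
--             lo = mid + 1
--         else:
--             hi = mid
--     return _CODES[lo]
-- ===== Notes on version B (the rewrite author's own statement) =====
-- stated objective: alternative
-- what changed: Replaces the linear scan over (lower, upper, code) range triples with bound checks plus a hand-written binary search over a sorted list of upper bounds indexing a parallel code list.
import Mathlib
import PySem

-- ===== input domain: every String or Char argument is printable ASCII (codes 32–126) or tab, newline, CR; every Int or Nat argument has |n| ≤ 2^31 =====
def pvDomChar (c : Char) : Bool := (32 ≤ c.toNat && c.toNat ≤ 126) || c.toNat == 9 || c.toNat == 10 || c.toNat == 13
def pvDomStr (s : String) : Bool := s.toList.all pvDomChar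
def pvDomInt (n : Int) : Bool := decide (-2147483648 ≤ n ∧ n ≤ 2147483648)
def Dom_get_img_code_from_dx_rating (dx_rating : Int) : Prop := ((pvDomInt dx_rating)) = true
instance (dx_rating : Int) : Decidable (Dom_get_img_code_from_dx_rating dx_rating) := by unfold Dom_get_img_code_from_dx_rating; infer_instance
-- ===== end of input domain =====

-- ===== PORT A =====
-- B replaces A's linear scan over range triples with a binary search over upper bounds (alternative structure).
def pvRangesA : List (Int × Int × String) :=
  [(0, 999, "01"), (1000, 1999, "02"), (2000, 3999, "03"), (4000, 6999, "04"),
   (7000, 9999, "05"), (10000, 11999, "06"), (12000, 12999, "07"),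
   (13000, 13999, "08"), (14000, 14499, "09"), (14500, 14999, "09")]

def pvLoopA (x : Int) : List (Int × Int × String) → String
  | [] => "10"
  | (lower, upper, code) :: rest =>
      if lower ≤ x ∧ x ≤ upper then code else pvLoopA x rest

def get_img_code_from_dx_rating (dx_rating : Int) : String :=
  pvLoopA dx_rating pvRangesA

-- ===== PORT B =====
def pvUppers : List Int := [999, 1999, 3999, 6999, 9999, 11999, 12999, 13999, 14499, 14999]
def pvCodes : List String := ["01", "02", "03", "04", "05", "06", "07", "08", "09", "09"]

def pvBisect (x : Int) (lo hi : Nat) : Nat :=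
  if lo < hi then
    let mid := (lo + hi) / 2
    if pvUppers.getD mid 0 < x then pvBisect x (mid + 1) hi else pvBisect x lo mid
  else lo
termination_by hi - lo
decreasing_by all_goals omega

def get_img_code_from_dx_rating_alt (dx_rating : Int) : String :=
  if dx_rating < 0 ∨ dx_rating > 14999 then "10"
  else pvCodes.getD (pvBisect dx_rating 0 pvUppers.length) "10"

-- ===== PRECONDITION & SPEC =====
def Spec_get_img_code_from_dx_rating (dx_rating : Int) (out : String) : Prop := out = get_img_code_from_dx_rating_alt dx_rating
instance (dx_rating : Int) (out : String) : Decidable (Spec_get_img_code_from_dx_rating dx_rating out) := by unfold Spec_get_img_code_from_dx_rating; infer_instance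

-- ===== CLAIM =====
def Claim_equal_get_img_code_from_dx_rating : Prop := ∀ (dx_rating : Int), Dom_get_img_code_from_dx_rating dx_rating → Spec_get_img_code_from_dx_rating dx_rating (get_img_code_from_dx_rating dx_rating)

-- ===== LEMMAS AND PROOFS =====

-- ===== VERDICT =====
set_option maxRecDepth 8000 in
set_option maxHeartbeats 1600000 in
theorem get_img_code_from_dx_rating_spec : Claim_equal_get_img_code_from_dx_rating := by
  intro x _
  unfold Spec_get_img_code_from_dx_rating get_img_code_from_dx_rating get_img_code_from_dx_rating_alt
  simp [pvRangesA, pvLoopA, pvBisect, pvUppers, pvCodes]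
  split_ifs <;> first | rfl | omega
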